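-- pv_equiv track=rewrite | github.com/sahild-cen/Label-EDI-Validator-2 | backend/app/services/rule_validator.py | _is_meta_field
-- ===== SOURCE A (Python) =====
-- def _is_meta_field(field: str) -> bool:
--     """Detect meta/structural field names that aren't real label fields."""
--     meta_keywords = [
--         "iso_standard", "specification", "example", "guide",
--         "implementation", "document", "version", "copyright",
--         "appendix", "annex", "glossary", "definition", "index",
--         "note", "remark", "comment", "instruction",
--     ]
--     return any(kw in field for kw in meta_keywords)
-- ===== SOURCE B (Python) =====
-- _META_KEYWORDS = (
--     "iso_standard", "specification", "example", "guide",
--     "implementation", "document", "version", "copyright",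
--     "appendix", "annex", "glossary", "definition", "index",
--     "note", "remark", "comment", "instruction",
-- )
--
--
-- def _is_meta_field(field: str) -> bool:
--     """Single left-to-right scan: at each position test whether some
--     keyword starts there (one pass over the string instead of one
--     containment scan per keyword)."""
--     for i in range(len(field)):
--         for kw in _META_KEYWORDS:
--             if field.startswith(kw, i):
--                 return True
--     return False
-- ===== Notes on version B (the rewrite author's own statement) =====
-- stated objective: alternative
-- what changed: A runs one full substring-containment scan per keyword (any(kw in field)); B makes a single left-to-right pass over the string, testing at each position whether any keyword starts there.
import Mathlib
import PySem

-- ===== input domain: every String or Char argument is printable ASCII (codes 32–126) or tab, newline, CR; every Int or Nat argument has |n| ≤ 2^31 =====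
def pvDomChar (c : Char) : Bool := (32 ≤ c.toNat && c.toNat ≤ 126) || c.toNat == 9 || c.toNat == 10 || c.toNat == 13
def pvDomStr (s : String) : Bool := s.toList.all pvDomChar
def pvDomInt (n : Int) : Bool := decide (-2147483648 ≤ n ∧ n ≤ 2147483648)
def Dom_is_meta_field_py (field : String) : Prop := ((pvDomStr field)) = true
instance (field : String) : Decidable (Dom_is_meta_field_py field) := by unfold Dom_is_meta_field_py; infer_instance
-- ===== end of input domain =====

-- B replaces A's per-keyword containment scans with a single left-to-right pass
-- testing keyword prefixes at each position (objective: alternative algorithm).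

-- ===== PORT A =====
def pvMetaKeywordsA : List String :=
  ["iso_standard", "specification", "example", "guide",
   "implementation", "document", "version", "copyright",
   "appendix", "annex", "glossary", "definition", "index",
   "note", "remark", "comment", "instruction"]

def is_meta_field_py (field : String) : Bool :=
  pvMetaKeywordsA.any (fun kw => PySem.Str.isIn kw field)

-- ===== PORT B =====
def pvMetaKeywordsB : List (List Char) :=
  ["iso_standard".toList, "specification".toList, "example".toList, "guide".toList,
   "implementation".toList, "document".toList, "version".toList, "copyright".toList,
   "appendix".toList, "annex".toList, "glossary".toList, "definition".toList, "index".toList,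
   "note".toList, "remark".toList, "comment".toList, "instruction".toList]

-- the scan over positions i of Source B, as structural recursion on the suffix at i
def pvScan : List Char → Bool
  | [] => false
  | c :: rest =>
      if pvMetaKeywordsB.any (fun kw => PySem.Chars.startswith (c :: rest) kw) then true
      else pvScan rest

def is_meta_field_py_alt (field : String) : Bool :=
  pvScan field.toList

-- ===== PRECONDITION & SPEC =====
def Spec_is_meta_field_py (field : String) (out : Bool) : Prop := out = is_meta_field_py_alt field
instance (field : String) (out : Bool) : Decidable (Spec_is_meta_field_py field out) := by unfold Spec_is_meta_field_py; infer_instance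

-- ===== CLAIM (what is proved, stated in full; the proofs are below) =====
def Claim_equal_is_meta_field_py : Prop := ∀ (field : String), Dom_is_meta_field_py field → Spec_is_meta_field_py field (is_meta_field_py field)

-- ===== LEMMAS AND PROOFS =====

theorem pv_isIn_cons (kw : List Char) (c : Char) (rest : List Char) :
    PySem.Chars.isIn kw (c :: rest)
      = (PySem.Chars.startswith (c :: rest) kw || PySem.Chars.isIn kw rest) := by
  rw [Bool.eq_iff_iff]
  simp [PySem.Chars.isIn_iff_infix, PySem.Chars.startswith_iff, List.infix_cons_iff]

theorem pv_any_or {α : Type} (l : List α) (f g : α → Bool) :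
    l.any (fun x => f x || g x) = (l.any f || l.any g) := by
  induction l with
  | nil => rfl
  | cons a t ih =>
      simp [List.any_cons, ih, Bool.or_assoc, Bool.or_left_comm]

theorem pvScan_eq (cs : List Char) :
    pvScan cs = pvMetaKeywordsB.any (fun kw => PySem.Chars.isIn kw cs) := by
  induction cs with
  | nil => decide
  | cons c rest ih =>
      have h : pvMetaKeywordsB.any (fun kw => PySem.Chars.isIn kw (c :: rest))
          = (pvMetaKeywordsB.any (fun kw => PySem.Chars.startswith (c :: rest) kw)
             || pvMetaKeywordsB.any (fun kw => PySem.Chars.isIn kw rest)) := by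
        simp only [pv_isIn_cons]
        exact pv_any_or _ _ _
      rw [pvScan, h]
      cases hs : pvMetaKeywordsB.any (fun kw => PySem.Chars.startswith (c :: rest) kw) with
      | true => simp
      | false => simp [ih]

-- ===== VERDICT (by name: the statement is the Claim_ definition above) =====
theorem is_meta_field_py_spec : Claim_equal_is_meta_field_py := by
  intro field _
  unfold Spec_is_meta_field_py is_meta_field_py is_meta_field_py_alt
  rw [pvScan_eq]
  simp [pvMetaKeywordsA, pvMetaKeywordsB]
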